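-- pv_equiv track=rewrite | github.com/Shashi-17-afk/Rift-2026 | backend/app/services/risk_engine.py | _alleles_to_diplotype
-- ===== SOURCE A (Python) =====
-- def _alleles_to_diplotype(allele_hits: list[tuple[str, str]], gene: str) -> tuple[str, str]:
--     if not allele_hits:
--         return "*1/*1", "normal+normal"
--     activities = [act for (_, act) in allele_hits]
--     stars = [star for (star, _) in allele_hits]
--     if len(activities) == 1:
--         return f"{stars[0]}/*1", f"{activities[0]}+normal"
--     return f"{stars[0]}/{stars[1]}", f"{activities[0]}+{activities[1]}"
-- ===== SOURCE B (Python) =====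
-- def _alleles_to_diplotype(allele_hits: list[tuple[str, str]], gene: str) -> tuple[str, str]:
--     # Pad with the default allele so no length branching is needed; the input list is not mutated.
--     (star0, act0), (star1, act1), *_ = allele_hits + [("*1", "normal"), ("*1", "normal")]
--     return f"{star0}/{star1}", f"{act0}+{act1}"
-- ===== Notes on version B (the rewrite author's own statement) =====
-- stated objective: simpler
-- what changed: Replaces A's three-way if/elif branching and two list comprehensions by padding the list with two ('*1','normal') defaults and formatting the first two entries in one branch-free step.
import Mathlib
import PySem

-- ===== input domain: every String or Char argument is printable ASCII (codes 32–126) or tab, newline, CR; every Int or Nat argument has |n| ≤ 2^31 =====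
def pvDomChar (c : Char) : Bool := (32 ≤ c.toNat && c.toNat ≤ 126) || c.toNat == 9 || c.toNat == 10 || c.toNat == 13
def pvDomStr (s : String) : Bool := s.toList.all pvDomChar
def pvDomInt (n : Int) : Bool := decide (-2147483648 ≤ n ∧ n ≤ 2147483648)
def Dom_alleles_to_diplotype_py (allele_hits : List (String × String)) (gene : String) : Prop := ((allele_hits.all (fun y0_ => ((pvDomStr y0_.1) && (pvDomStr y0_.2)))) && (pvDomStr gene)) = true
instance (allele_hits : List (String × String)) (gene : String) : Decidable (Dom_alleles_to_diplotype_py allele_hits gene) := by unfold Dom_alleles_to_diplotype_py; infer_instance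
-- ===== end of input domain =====

-- B pads the list with two default ('*1','normal') entries and formats the first two, removing A's branching; objective: simpler.

-- ===== PORT A =====
-- indices 0 and 1 are always in range in the branches that use them, so `.getD ""` never fires
def alleles_to_diplotype_py (allele_hits : List (String × String)) (gene : String) : String × String :=
  if allele_hits = [] then ("*1/*1", "normal+normal")
  else
    let activities := allele_hits.map (fun p => p.2)
    let stars := allele_hits.map (fun p => p.1)
    if activities.length = 1 then
      ((PySem.List.pyGet? stars 0).getD "" ++ "/*1", (PySem.List.pyGet? activities 0).getD "" ++ "+normal")
    else
      ((PySem.List.pyGet? stars 0).getD "" ++ "/" ++ (PySem.List.pyGet? stars 1).getD "",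
       (PySem.List.pyGet? activities 0).getD "" ++ "+" ++ (PySem.List.pyGet? activities 1).getD "")

-- ===== PORT B =====
def alleles_to_diplotype_py_alt (allele_hits : List (String × String)) (gene : String) : String × String :=
  match allele_hits ++ [("*1", "normal"), ("*1", "normal")] with
  | (star0, act0) :: (star1, act1) :: _ => (star0 ++ "/" ++ star1, act0 ++ "+" ++ act1)
  | _ => ("", "")  -- unreachable: the padded list always has ≥ 2 elements

-- ===== PRECONDITION & SPEC =====
def Spec_alleles_to_diplotype_py (allele_hits : List (String × String)) (gene : String) (out : String × String) : Prop := out = alleles_to_diplotype_py_alt allele_hits gene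
instance (allele_hits : List (String × String)) (gene : String) (out : String × String) : Decidable (Spec_alleles_to_diplotype_py allele_hits gene out) := by unfold Spec_alleles_to_diplotype_py; infer_instance

-- ===== CLAIM (what is proved, stated in full; the proofs are below) =====
def Claim_equal_alleles_to_diplotype_py : Prop := ∀ (allele_hits : List (String × String)) (gene : String), Dom_alleles_to_diplotype_py allele_hits gene → Spec_alleles_to_diplotype_py allele_hits gene (alleles_to_diplotype_py allele_hits gene)

-- ===== LEMMAS AND PROOFS =====
-- ===== VERDICT (by name: the statement is the Claim_ definition above) =====
theorem alleles_to_diplotype_py_spec : Claim_equal_alleles_to_diplotype_py := by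
  intro allele_hits gene _
  unfold Spec_alleles_to_diplotype_py alleles_to_diplotype_py alleles_to_diplotype_py_alt
  match allele_hits with
  | [] => rfl
  | [(s, a)] =>
    simp [PySem.List.pyGet?, PySem.List.pyIdx?, String.append_assoc]
  | (s, a) :: (s', a') :: rest =>
    have h : (0:Int) ≤ (rest.length : Int) + 1 := by positivity
    simp [PySem.List.pyGet?, PySem.List.pyIdx?, String.append_assoc, h]
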